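-- pv_equiv track=rewrite | github.com/HaloOrangeWang/NoiseMaker | MakerSrc/datainputs/melody.py | get_continuous_bar_cnt
-- ===== SOURCE A (Python) =====
-- import math
--
-- def get_continuous_bar_cnt(raw_melody_data):
--     """
--     获取一首歌连续的小节数
--     :param raw_melody_data: 这首歌的音符列表
--     :return: 这首歌的连续小节数
--     """
--     # 1.获取歌曲的小节数量
--     bar_num = math.ceil(len(raw_melody_data) / 32)
--     continuous_bar_cnt_list = [0 for t in range(bar_num)]
--     # 2.获取歌曲连续小节编号
--     for key in range(bar_num):
--         if raw_melody_data[key * 32: (key + 1) * 32] == [0 for t in range(32)]: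
--             continuous_bar_cnt_list[key] = 0
--         elif key == 0:
--             continuous_bar_cnt_list[key] = 1
--         else:
--             continuous_bar_cnt_list[key] = continuous_bar_cnt_list[key - 1] + 1
--     return continuous_bar_cnt_list
-- ===== SOURCE B (Python) =====
-- def get_continuous_bar_cnt(raw_melody_data):
--     """Run-based rewrite: chunk the melody into 32-step bars, then emit each
--     maximal run of non-empty bars as 1..k (0 for empty bars)."""
--     n = len(raw_melody_data)
--     chunks = [raw_melody_data[i:i + 32] for i in range(0, n, 32)]
--     # NB: the literal comparison with [0]*32 (not an all-zero test) keeps a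
--     # short trailing all-zero bar non-empty, exactly as in the original.
--     empty = [chunk == [0] * 32 for chunk in chunks]
--     out = []
--     i = 0
--     m = len(empty)
--     while i < m:
--         if empty[i]:
--             out.append(0)
--             i += 1
--         else:
--             j = i
--             while j < m and not empty[j]:
--                 j += 1
--             out.extend(range(1, j - i + 1))
--             i = j
--     return out
-- ===== Notes on version B (the rewrite author's own statement) =====
-- stated objective: alternative
-- what changed: A fills a zero-initialised list cell by cell, each bar re-reading its predecessor's count from the list; B classifies the 32-step bars once into emptiness flags and then emits each maximal run of non-empty bars as 1..k in one go (0 per empty bar), concatenating the runs.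
import Mathlib
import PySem

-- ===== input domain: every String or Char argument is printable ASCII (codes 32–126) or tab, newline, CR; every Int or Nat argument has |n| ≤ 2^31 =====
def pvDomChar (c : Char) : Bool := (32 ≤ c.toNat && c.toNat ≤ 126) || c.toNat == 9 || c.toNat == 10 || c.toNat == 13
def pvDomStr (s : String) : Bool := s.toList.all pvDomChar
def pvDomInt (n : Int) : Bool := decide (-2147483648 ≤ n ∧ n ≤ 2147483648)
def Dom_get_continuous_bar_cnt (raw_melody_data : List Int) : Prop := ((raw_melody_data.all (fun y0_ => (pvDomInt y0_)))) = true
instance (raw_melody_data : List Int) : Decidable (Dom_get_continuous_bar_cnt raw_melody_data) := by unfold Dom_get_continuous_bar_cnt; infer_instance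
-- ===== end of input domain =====

-- B replaces A's cell-by-cell mutated list (each bar reading its predecessor's count)
-- by a run-based decomposition: classify the 32-step bars once, then emit each maximal
-- run of non-empty bars as 1..k in one go (objective: alternative decomposition).

-- ===== PORT A =====
-- math.ceil(len/32): exact as the integer ceiling -((-len) // 32) — len/32 is an
-- exact binary float for every list length, so the float ceil equals the integer ceil.
def get_continuous_bar_cnt (raw_melody_data : List Int) : List Int :=
  let bar_num : Int := -(PySem.Int.floordiv (-(raw_melody_data.length : Int)) 32)
  let init : List Int := (PySem.List.pyRange 0 bar_num 1).map (fun _ => (0 : Int))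
  (PySem.List.pyRange 0 bar_num 1).foldl (fun lst key =>
    if PySem.List.slice raw_melody_data (some (key * 32)) (some ((key + 1) * 32))
        = (PySem.List.pyRange 0 32 1).map (fun _ => (0 : Int)) then
      PySem.List.pySetD lst key 0
    else if key = 0 then
      PySem.List.pySetD lst key 1
    else
      PySem.List.pySetD lst key (PySem.List.pyGetD lst (key - 1) 0 + 1)) init

-- ===== PORT B =====
-- the outer while-loop of Source B: walk the bar-emptiness flags run by run
def pvEmitRuns : List Bool → List Int
  | [] => []
  | true :: r => 0 :: pvEmitRuns r
  | false :: r =>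
      PySem.List.pyRange 1 (((List.takeWhile (fun x => !x) (false :: r)).length : Int) + 1) 1
        ++ pvEmitRuns (List.dropWhile (fun x => !x) (false :: r))
termination_by l => l.length
decreasing_by
  all_goals simp only [List.dropWhile, Bool.not_false, List.length_cons]
  · omega
  · have := List.length_dropWhile_le (fun x => !x) r
    omega

def get_continuous_bar_cnt_alt (raw_melody_data : List Int) : List Int :=
  let n : Int := (raw_melody_data.length : Int)
  let chunks := (PySem.List.pyRange 0 n 32).map
    (fun i => PySem.List.slice raw_melody_data (some i) (some (i + 32)))
  let empty := chunks.map (fun c => decide (c = List.replicate 32 (0 : Int)))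
  pvEmitRuns empty

-- ===== PRECONDITION & SPEC =====
def Spec_get_continuous_bar_cnt (raw_melody_data : List Int) (out : List Int) : Prop := out = get_continuous_bar_cnt_alt raw_melody_data
instance (raw_melody_data : List Int) (out : List Int) : Decidable (Spec_get_continuous_bar_cnt raw_melody_data out) := by unfold Spec_get_continuous_bar_cnt; infer_instance

-- ===== CLAIM (what is proved, stated in full; the proofs are below) =====
def Claim_equal_get_continuous_bar_cnt : Prop := ∀ (raw_melody_data : List Int), Dom_get_continuous_bar_cnt raw_melody_data → Spec_get_continuous_bar_cnt raw_melody_data (get_continuous_bar_cnt raw_melody_data)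

-- ===== LEMMAS AND PROOFS =====

-- bar k of the melody is "empty": its 32-slice literally equals [0]*32
def pvBarEmpty (raw : List Int) (k : Nat) : Bool :=
  decide ((raw.drop (32 * k)).take 32 = List.replicate 32 (0 : Int))

-- the common reference semantics: thread the running count c through the flags
def pvGA (c : Int) : List Bool → List Int
  | [] => []
  | e :: r => (if e then 0 else c + 1) :: pvGA (if e then 0 else c + 1) r

lemma pv_rep32 : (PySem.List.pyRange 0 32 1).map (fun _ => (0 : Int)) = List.replicate 32 0 := by
  decide

lemma pv_slice_bar (raw : List Int) (k : Nat) :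
    PySem.List.slice raw (some ((k : Int) * 32)) (some (((k : Int) + 1) * 32))
      = (raw.drop (32 * k)).take 32 := by
  have h1 : (k : Int) * 32 = ((32 * k : Nat) : Int) := by push_cast; ring
  have h2 : ((k : Int) + 1) * 32 = ((32 * k : Nat) : Int) + ((32 : Nat) : Int) := by push_cast; ring
  rw [h1, h2, PySem.List.slice_natCast_add]

lemma pv_set_append_mid {α : Type} (pre : List α) (x v : α) (t : List α) :
    (pre ++ x :: t).set pre.length v = pre ++ v :: t := by
  induction pre with
  | nil => simp
  | cons a l ih => simp [ih]

lemma pv_getD_append_last {α : Type} (pre rest : List α) (d : α) (h : pre ≠ []) :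
    (pre ++ rest).getD (pre.length - 1) d = pre.getLastD d := by
  induction pre with
  | nil => simp at h
  | cons a l ih =>
    cases l with
    | nil => simp
    | cons b m => simpa using ih (by simp)

-- A's fold, characterised: after writing `pre`, the remaining keys fill in pvGA
lemma pv_A_fold (raw : List Int) (len : Nat) : ∀ (pre : List Int),
    ((PySem.List.pyRange (pre.length : Int) ((pre.length : Int) + (len : Int)) 1).foldl
      (fun lst key =>
        if PySem.List.slice raw (some (key * 32)) (some ((key + 1) * 32))
            = List.replicate 32 (0 : Int) then
          PySem.List.pySetD lst key 0
        else if key = 0 then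
          PySem.List.pySetD lst key 1
        else
          PySem.List.pySetD lst key (PySem.List.pyGetD lst (key - 1) 0 + 1))
      (pre ++ List.replicate len 0))
    = pre ++ pvGA (pre.getLastD 0) ((List.range' pre.length len).map (pvBarEmpty raw)) := by
  induction len with
  | zero =>
    intro pre
    rw [PySem.List.pyRange_one_eq_nil (by push_cast; omega)]
    simp [pvGA]
  | succ n ih =>
    intro pre
    rw [PySem.List.pyRange_one_cons (a := (pre.length : Int))
      (b := (pre.length : Int) + ((n + 1 : Nat) : Int)) (by push_cast; omega)]
    rw [List.foldl_cons]
    set v : Int := if pvBarEmpty raw pre.length = true then 0 else pre.getLastD 0 + 1 with hv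
    have hstep :
        (if PySem.List.slice raw (some ((pre.length : Int) * 32)) (some (((pre.length : Int) + 1) * 32))
            = List.replicate 32 (0 : Int) then
          PySem.List.pySetD (pre ++ List.replicate (n + 1) 0) (pre.length : Int) 0
        else if (pre.length : Int) = 0 then
          PySem.List.pySetD (pre ++ List.replicate (n + 1) 0) (pre.length : Int) 1
        else
          PySem.List.pySetD (pre ++ List.replicate (n + 1) 0) (pre.length : Int)
            (PySem.List.pyGetD (pre ++ List.replicate (n + 1) 0) ((pre.length : Int) - 1) 0 + 1))
        = (pre ++ [v]) ++ List.replicate n 0 := by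
      rw [pv_slice_bar]
      by_cases hE : pvBarEmpty raw pre.length = true
      · have hyes : (raw.drop (32 * pre.length)).take 32 = List.replicate 32 0 := by
          simpa [pvBarEmpty] using hE
        rw [if_pos hyes, PySem.List.pySetD_natCast]
        rw [show List.replicate (n + 1) (0 : Int) = 0 :: List.replicate n 0 from rfl]
        rw [pv_set_append_mid]
        simp [hv, hE]
      · have hno : ¬ (raw.drop (32 * pre.length)).take 32 = List.replicate 32 0 := by
          simpa [pvBarEmpty] using hE
        rw [if_neg hno]
        by_cases h0 : pre = []
        · subst h0
          rw [if_pos (by simp), PySem.List.pySetD_natCast]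
          simp [hv, List.replicate_succ]
          simpa using hE
        · have hlen : 0 < pre.length := List.length_pos_iff.mpr h0
          rw [if_neg (by exact_mod_cast Nat.pos_iff_ne_zero.mp hlen)]
          have hm1 : (pre.length : Int) - 1 = ((pre.length - 1 : Nat) : Int) := by push_cast [hlen]; omega
          rw [hm1, PySem.List.pyGetD_natCast, pv_getD_append_last _ _ _ h0]
          rw [PySem.List.pySetD_natCast]
          rw [show List.replicate (n + 1) (0 : Int) = 0 :: List.replicate n 0 from rfl]
          rw [pv_set_append_mid]
          simp [hv, hE]
    rw [hstep]
    have hrng : PySem.List.pyRange ((pre.length : Int) + 1)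
        ((pre.length : Int) + ((n + 1 : Nat) : Int)) 1
        = PySem.List.pyRange (((pre ++ [v]).length : Int)) (((pre ++ [v]).length : Int) + (n : Int)) 1 := by
      congr 1 <;> · push_cast; simp; try ring
    rw [hrng, ih (pre ++ [v])]
    have hlast : (pre ++ [v]).getLastD 0 = v := by simp
    rw [hlast, List.append_assoc]
    congr 1
    rw [show (pre ++ [v]).length = pre.length + 1 by simp]
    rw [List.range'_succ, List.map_cons]
    show pvGA (pre.getLastD 0) (pvBarEmpty raw pre.length :: _) = _
    rw [pvGA]

-- run expansion of pvGA
lemma pv_gA_run (r : List Bool) (c : Int) :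
    pvGA c r = (List.range (List.takeWhile (fun x => !x) r).length).map (fun i : Nat => c + 1 + (i : Int))
      ++ pvGA (c + ((List.takeWhile (fun x => !x) r).length : Int)) (List.dropWhile (fun x => !x) r) := by
  induction r generalizing c with
  | nil => simp [pvGA]
  | cons e r ih =>
    cases e with
    | true => simp [List.takeWhile, List.dropWhile, pvGA]
    | false =>
      simp only [List.takeWhile, List.dropWhile, Bool.not_false, List.length_cons]
      rw [List.range_succ_eq_map, List.map_cons, List.map_map]
      rw [show pvGA c (false :: r) = (c + 1) :: pvGA (c + 1) r from rfl]
      rw [ih (c + 1)]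
      rw [List.cons_append]
      congr 1
      · simp
      congr 1
      · apply List.map_congr_left; intro i _
        simp only [Function.comp]; push_cast; ring
      · congr 1; push_cast; ring

lemma pv_gA_reset (c : Int) (l : List Bool) (h : l = [] ∨ ∃ r, l = true :: r) :
    pvGA c l = pvGA 0 l := by
  rcases h with h | ⟨r, h⟩ <;> subst h <;> simp [pvGA]

lemma pv_dropWhile_shape (l : List Bool) :
    List.dropWhile (fun x => !x) l = [] ∨ ∃ r, List.dropWhile (fun x => !x) l = true :: r := by
  induction l with
  | nil => simp
  | cons e r ih =>
    cases e with
    | true => right; exact ⟨r, by simp [List.dropWhile]⟩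
    | false => simpa [List.dropWhile] using ih

lemma pv_emitRuns_eq_gA (E : List Bool) : pvEmitRuns E = pvGA 0 E := by
  induction E using pvEmitRuns.induct with
  | case1 => simp [pvEmitRuns, pvGA]
  | case2 r ih =>
    rw [pvEmitRuns, pvGA]
    simp [ih]
  | case3 r ih =>
    rw [pvEmitRuns, ih]
    conv_rhs => rw [pv_gA_run (false :: r) 0]
    congr 1
    · rw [PySem.List.pyRange_one]
      have ht : ((((List.takeWhile (fun x => !x) (false :: r)).length : Int) + 1 - 1).toNat)
          = (List.takeWhile (fun x => !x) (false :: r)).length := by omega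
      rw [ht]
      apply List.map_congr_left
      intro i _; push_cast; ring
    · exact (pv_gA_reset _ _ (pv_dropWhile_shape (false :: r))).symm

-- bar_num of A equals the Nat ceiling (len+31)/32
lemma pv_bar_num (len : Nat) :
    -(PySem.Int.floordiv (-(len : Int)) 32) = (((len + 31) / 32 : Nat) : Int) := by
  rw [PySem.Int.neg_floordiv_neg_eq_iff_of_pos (by norm_num : (0:Int) < 32)]
  constructor <;> omega

lemma pv_map_const_zero (n : Nat) :
    (PySem.List.pyRange 0 (n : Int) 1).map (fun _ => (0 : Int)) = List.replicate n 0 := by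
  rw [List.eq_replicate_iff]
  constructor
  · simp [PySem.List.length_pyRange_one]
  · intro b hb
    rcases List.mem_map.mp hb with ⟨x, hx, h⟩
    exact h.symm

-- B's emptiness flags are exactly the bar flags over range nb
lemma pv_B_flags (raw : List Int) :
    ((PySem.List.pyRange 0 (raw.length : Int) 32).map
        (fun i => PySem.List.slice raw (some i) (some (i + 32)))).map
      (fun c => decide (c = List.replicate 32 (0 : Int)))
    = (List.range ((raw.length + 31) / 32)).map (pvBarEmpty raw) := by
  rw [PySem.List.pyRange_of_pos _ _ (by norm_num : (0:Int) < 32)]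
  have hcount : (if (0:Int) < (raw.length : Int)
      then (((raw.length : Int) - 0 + 32 - 1) / 32).toNat else 0) = (raw.length + 31) / 32 := by
    split <;> omega
  rw [hcount, List.map_map, List.map_map]
  apply List.map_congr_left
  intro k _
  simp only [Function.comp, pvBarEmpty]
  rw [decide_eq_decide]
  have h1 : (0 : Int) + 32 * (k : Int) = ((32 * k : Nat) : Int) := by push_cast; ring
  rw [h1]
  rw [show ((32 * k : Nat) : Int) + 32 = ((32 * k : Nat) : Int) + ((32 : Nat) : Int) by norm_num]
  rw [PySem.List.slice_natCast_add]

-- ===== VERDICT (by name: the statement is the Claim_ definition above) =====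
theorem get_continuous_bar_cnt_spec : Claim_equal_get_continuous_bar_cnt := by
  intro raw _
  unfold Spec_get_continuous_bar_cnt get_continuous_bar_cnt get_continuous_bar_cnt_alt
  simp only [pv_rep32, pv_bar_num, pv_map_const_zero, pv_B_flags, pv_emitRuns_eq_gA]
  have h := pv_A_fold raw ((raw.length + 31) / 32) []
  simp only [List.length_nil, Nat.cast_zero, List.nil_append, List.getLastD_nil, zero_add] at h
  rw [h, List.range_eq_range']
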